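-- pv_equiv track=rewrite | github.com/kevinpt/ripyl | ripyl/protocol/obd2.py | _get_fuel_status
-- ===== SOURCE A (Python) =====
-- def _get_fuel_status(a, b):
--     '''Decode response for sid 0x01, pid 0x03'''
--     r = {}
--
--     status_codes = ['Open loop due to insufficient engine temperature', \
--         'Closed loop, using oxygen sensor feedback to determine fuel mix', \
--         'Open loop due to engine load OR fuel cut due to deceleration', \
--         'Open loop due to system failure', \
--         'Closed loop, using at least one oxygen sensor but there is a fault in the feedback system']
--
--     for system, byte in [('fuel1', a), ('fuel2', b)]:
--         # decode the status. This is a one-hot encoding in bits 0-4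
--         if byte & 0x01:
--             r[system] = status_codes[0]
--         elif byte & 0x02:
--             r[system] = status_codes[1]
--         elif byte & 0x04:
--             r[system] = status_codes[2]
--         elif byte & 0x08:
--             r[system] = status_codes[3]
--         elif byte & 0x10:
--             r[system] = status_codes[4]
--
--     return r
-- ===== SOURCE B (Python) =====
-- def _get_fuel_status(a, b):
--     '''Decode response for sid 0x01, pid 0x03'''
--     status_codes = ['Open loop due to insufficient engine temperature', \
--         'Closed loop, using oxygen sensor feedback to determine fuel mix', \
--         'Open loop due to engine load OR fuel cut due to deceleration', \
--         'Open loop due to system failure', \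
--         'Closed loop, using at least one oxygen sensor but there is a fault in the feedback system']
--
--     r = {}
--     for system, byte in [('fuel1', a), ('fuel2', b)]:
--         mask = byte & 0x1F
--         if mask:
--             r[system] = status_codes[(mask & -mask).bit_length() - 1]
--     return r
-- ===== Notes on version B (the rewrite author's own statement) =====
-- stated objective: idiomatic
-- what changed: Replaces A's five-way if/elif bit-test ladder with a single arithmetic computation: mask the byte to bits 0-4, isolate the lowest set bit with mask & -mask, and convert it to a status-table index via bit_length() - 1.
import Mathlib
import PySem

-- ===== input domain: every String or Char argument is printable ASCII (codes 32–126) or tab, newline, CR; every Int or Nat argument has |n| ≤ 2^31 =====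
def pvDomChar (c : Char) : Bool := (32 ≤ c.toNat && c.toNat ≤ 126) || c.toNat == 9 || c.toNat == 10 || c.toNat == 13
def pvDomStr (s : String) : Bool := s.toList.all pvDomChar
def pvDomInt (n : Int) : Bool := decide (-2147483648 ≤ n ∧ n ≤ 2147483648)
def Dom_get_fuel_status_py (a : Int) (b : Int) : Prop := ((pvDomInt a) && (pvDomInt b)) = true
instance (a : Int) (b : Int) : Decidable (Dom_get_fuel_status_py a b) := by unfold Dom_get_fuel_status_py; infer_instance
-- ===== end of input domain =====

-- B replaces A's five-way if/elif bit-test ladder by one arithmetic computation of the lowest set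
-- bit of byte & 0x1F ((mask & -mask).bit_length() - 1 indexes the status list); objective: idiomatic.

-- shared constant: the status-string table both Pythons carry verbatim
def pvStatusCodes : List String :=
  ["Open loop due to insufficient engine temperature",
   "Closed loop, using oxygen sensor feedback to determine fuel mix",
   "Open loop due to engine load OR fuel cut due to deceleration",
   "Open loop due to system failure",
   "Closed loop, using at least one oxygen sensor but there is a fault in the feedback system"]

-- ===== PORT A =====
-- body of A's loop: the five-way if/elif ladder on bits 0-4 of byte
def pvStepA (r : PySem.Dict String String) (sb : String × Int) : PySem.Dict String String :=
  let system := sb.1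
  let byte := sb.2
  if PySem.Int.band byte 0x01 ≠ 0 then r.insert system (pvStatusCodes[0]!)
  else if PySem.Int.band byte 0x02 ≠ 0 then r.insert system (pvStatusCodes[1]!)
  else if PySem.Int.band byte 0x04 ≠ 0 then r.insert system (pvStatusCodes[2]!)
  else if PySem.Int.band byte 0x08 ≠ 0 then r.insert system (pvStatusCodes[3]!)
  else if PySem.Int.band byte 0x10 ≠ 0 then r.insert system (pvStatusCodes[4]!)
  else r

def get_fuel_status_py (a : Int) (b : Int) : List (String × String) :=
  (([("fuel1", a), ("fuel2", b)] : List (String × Int)).foldl pvStepA PySem.Dict.empty).items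

-- ===== PORT B =====
-- body of B's loop: mask to bits 0-4, index by the lowest set bit's position
def pvStepB (r : PySem.Dict String String) (sb : String × Int) : PySem.Dict String String :=
  let mask := PySem.Int.band sb.2 0x1F
  if mask ≠ 0 then
    r.insert sb.1 (pvStatusCodes[PySem.Int.bitLength (PySem.Int.band mask (-mask)) - 1]!)
  else r

def get_fuel_status_py_alt (a : Int) (b : Int) : List (String × String) :=
  (([("fuel1", a), ("fuel2", b)] : List (String × Int)).foldl pvStepB PySem.Dict.empty).items

-- ===== PRECONDITION & SPEC =====
def Spec_get_fuel_status_py (a : Int) (b : Int) (out : List (String × String)) : Prop := out = get_fuel_status_py_alt a b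
instance (a : Int) (b : Int) (out : List (String × String)) : Decidable (Spec_get_fuel_status_py a b out) := by unfold Spec_get_fuel_status_py; infer_instance

-- ===== CLAIM (what is proved, stated in full; the proofs are below) =====
def Claim_equal_get_fuel_status_py : Prop := ∀ (a : Int) (b : Int), Dom_get_fuel_status_py a b → Spec_get_fuel_status_py a b (get_fuel_status_py a b)

-- ===== LEMMAS AND PROOFS =====

-- bits 0-4 only depend on the value mod 32
lemma pv_and_pow_mod32 (m k : Nat) (hk : k < 5) : (m % 2 ^ 5) &&& 2 ^ k = m &&& 2 ^ k := by
  rw [Nat.and_two_pow, Nat.and_two_pow, Nat.testBit_mod_two_pow]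
  simp [hk]

lemma pv_band_neg_left (n : Nat) (c : Nat) :
    PySem.Int.band (-(n : Int) - 1) (c : Int) = ((c - (c &&& n) : Nat) : Int) := by
  simp only [PySem.Int.band]
  rw [if_neg (by omega), if_pos (by omega)]
  simp

-- the two loop bodies agree on every byte
lemma pv_step_eq (d : PySem.Dict String String) (s : String) (byte : Int) :
    pvStepA d (s, byte) = pvStepB d (s, byte) := by
  by_cases h : 0 ≤ byte
  · obtain ⟨m, rfl⟩ : ∃ m : Nat, byte = (m : Int) := ⟨byte.toNat, (Int.toNat_of_nonneg h).symm⟩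
    have e : ∀ c : Nat, PySem.Int.band (m : Int) (c : Int) = ((m &&& c : Nat) : Int) :=
      fun c => PySem.Int.band_natCast m c
    have h1 : PySem.Int.band (m : Int) 0x01 = ((m &&& 1 : Nat) : Int) := by exact_mod_cast e 1
    have h2 : PySem.Int.band (m : Int) 0x02 = ((m &&& 2 : Nat) : Int) := by exact_mod_cast e 2
    have h4 : PySem.Int.band (m : Int) 0x04 = ((m &&& 4 : Nat) : Int) := by exact_mod_cast e 4
    have h8 : PySem.Int.band (m : Int) 0x08 = ((m &&& 8 : Nat) : Int) := by exact_mod_cast e 8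
    have h16 : PySem.Int.band (m : Int) 0x10 = ((m &&& 16 : Nat) : Int) := by exact_mod_cast e 16
    have h31 : PySem.Int.band (m : Int) 0x1F = ((m &&& 31 : Nat) : Int) := by exact_mod_cast e 31
    have c1 : m &&& 1 = (m % 32) &&& 1 := by
      have := pv_and_pow_mod32 m 0 (by norm_num); norm_num at this ⊢
    have c2 : m &&& 2 = (m % 32) &&& 2 := by
      have := pv_and_pow_mod32 m 1 (by norm_num); norm_num at this ⊢; all_goals omega
    have c4 : m &&& 4 = (m % 32) &&& 4 := by
      have := pv_and_pow_mod32 m 2 (by norm_num); norm_num at this ⊢; all_goals omega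
    have c8 : m &&& 8 = (m % 32) &&& 8 := by
      have := pv_and_pow_mod32 m 3 (by norm_num); norm_num at this ⊢; all_goals omega
    have c16 : m &&& 16 = (m % 32) &&& 16 := by
      have := pv_and_pow_mod32 m 4 (by norm_num); norm_num at this ⊢; all_goals omega
    have c31 : m &&& 31 = m % 32 := by
      have := Nat.and_two_pow_sub_one_eq_mod m 5; norm_num at this; all_goals omega
    simp only [pvStepA, pvStepB, h1, h2, h4, h8, h16, h31, c1, c2, c4, c8, c16, c31]
    have hr : m % 32 < 32 := Nat.mod_lt _ (by norm_num)
    set r := m % 32 with hrdef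
    clear_value r
    interval_cases r <;> rfl
  · obtain ⟨n, rfl⟩ : ∃ n : Nat, byte = -(n : Int) - 1 := ⟨(-byte - 1).toNat, by omega⟩
    have h1 : PySem.Int.band (-(n : Int) - 1) 0x01 = ((1 - (1 &&& n) : Nat) : Int) := by
      exact_mod_cast pv_band_neg_left n 1
    have h2 : PySem.Int.band (-(n : Int) - 1) 0x02 = ((2 - (2 &&& n) : Nat) : Int) := by
      exact_mod_cast pv_band_neg_left n 2
    have h4 : PySem.Int.band (-(n : Int) - 1) 0x04 = ((4 - (4 &&& n) : Nat) : Int) := by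
      exact_mod_cast pv_band_neg_left n 4
    have h8 : PySem.Int.band (-(n : Int) - 1) 0x08 = ((8 - (8 &&& n) : Nat) : Int) := by
      exact_mod_cast pv_band_neg_left n 8
    have h16 : PySem.Int.band (-(n : Int) - 1) 0x10 = ((16 - (16 &&& n) : Nat) : Int) := by
      exact_mod_cast pv_band_neg_left n 16
    have h31 : PySem.Int.band (-(n : Int) - 1) 0x1F = ((31 - (31 &&& n) : Nat) : Int) := by
      exact_mod_cast pv_band_neg_left n 31
    have c1 : 1 &&& n = 1 &&& (n % 32) := by
      have := pv_and_pow_mod32 n 0 (by norm_num)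
      rw [Nat.and_comm 1 n, Nat.and_comm 1 (n % 32)]; norm_num at this ⊢
    have c2 : 2 &&& n = 2 &&& (n % 32) := by
      have := pv_and_pow_mod32 n 1 (by norm_num)
      rw [Nat.and_comm 2 n, Nat.and_comm 2 (n % 32)]; norm_num at this ⊢; all_goals omega
    have c4 : 4 &&& n = 4 &&& (n % 32) := by
      have := pv_and_pow_mod32 n 2 (by norm_num)
      rw [Nat.and_comm 4 n, Nat.and_comm 4 (n % 32)]; norm_num at this ⊢; all_goals omega
    have c8 : 8 &&& n = 8 &&& (n % 32) := by
      have := pv_and_pow_mod32 n 3 (by norm_num)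
      rw [Nat.and_comm 8 n, Nat.and_comm 8 (n % 32)]; norm_num at this ⊢; all_goals omega
    have c16 : 16 &&& n = 16 &&& (n % 32) := by
      have := pv_and_pow_mod32 n 4 (by norm_num)
      rw [Nat.and_comm 16 n, Nat.and_comm 16 (n % 32)]; norm_num at this ⊢; all_goals omega
    have c31 : 31 &&& n = n % 32 := by
      have := Nat.and_two_pow_sub_one_eq_mod n 5
      rw [Nat.and_comm 31 n]; norm_num at this; all_goals omega
    simp only [pvStepA, pvStepB, h1, h2, h4, h8, h16, h31, c1, c2, c4, c8, c16, c31]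
    have hr : n % 32 < 32 := Nat.mod_lt _ (by norm_num)
    set r := n % 32 with hrdef
    clear_value r
    interval_cases r <;> rfl

-- ===== VERDICT (by name: the statement is the Claim_ definition above) =====
theorem get_fuel_status_py_spec : Claim_equal_get_fuel_status_py := by
  intro a b _
  show get_fuel_status_py a b = get_fuel_status_py_alt a b
  simp only [get_fuel_status_py, get_fuel_status_py_alt, List.foldl]
  rw [pv_step_eq, pv_step_eq]
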